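-- pv_equiv track=rewrite | github.com/jsnjuan/Competitive-Programming | Google'sCodingCompetitions/CodeJam/2019/QualificationRound/YouCanGoYourOwnWay_5_9pts.py | gen_sol
-- ===== SOURCE A (Python) =====
-- def neighbors(n, path, node,edges_restricted):
--     # Possible neighbors are generated going only
--     # south or east, so we validate they are
--     # valid paths
--     v1 = tuple(map(lambda x, y: x + y, node, (1, 0)))
--     p1 = path +  'S'
--     v2 = tuple(map(lambda x, y: x + y, node, (0, 1)))
--     p2 = path +  'E'
--
--     ls = []
--
--     if (node, v1) not in edges_restricted and v1[0] < n and v1[1] < n: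
--         ls.append((p1, v1))
--     if (node, v2) not in edges_restricted and v2[0] < n and v2[1] < n:
--         ls.append((p2, v2))
--
--     return ls
--
-- def gen_edges_restricted(P):
--     st = set()
--     ini = 0, 0
--     for movement in P:
--         if movement == 'S':
--             nxt = tuple(map(lambda x, y: x + y, ini, (1, 0)))
--         else:
--             nxt = tuple(map(lambda x, y: x + y, ini, (0, 1)))
--         st.add((ini, nxt))
--         ini = nxt
--     return st
--
-- def gen_sol(n, P):
--
--     edges_restricted = gen_edges_restricted(P)
--
--     ini = 0, 0
--     fin = n - 1, n - 1
--
--     visited, stack = set(), [('',ini)]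
--
--     path = None
--
--     while True:
--         path, node = stack.pop()
--         if fin == node:
--             break
--         if node not in visited:
--             visited.add(node)
--             ls_vs = neighbors(n, path, node,edges_restricted)
--             stack.extend(ls_vs)
--
--     return path
-- ===== SOURCE B (Python) =====
-- def gen_sol(n, P):
--     # Backtracking walker: keep one current node, the trail of moves that led
--     # to it, and the directions still untried there (East before South, like
--     # the original's pop order); nodes are marked visited when stepped onto.
--     blocked = set()
--     r = c = 0
--     for ch in P:
--         if ch == 'S':
--             blocked.add(((r, c), (r + 1, c)))
--             r += 1
--         else:
--             blocked.add(((r, c), (r, c + 1)))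
--             c += 1
--     fin = (n - 1, n - 1)
--     visited = {(0, 0)}
--     trail = []              # moves of the current partial path
--     node = (0, 0)
--     todo = 'ES'             # directions still to try from node, East first
--     while node != fin:
--         if todo:
--             d, todo = todo[0], todo[1:]
--             nxt = (node[0], node[1] + 1) if d == 'E' else (node[0] + 1, node[1])
--             if nxt[0] < n and nxt[1] < n and (node, nxt) not in blocked and nxt not in visited:
--                 visited.add(nxt)
--                 trail.append(d)
--                 node = nxt
--                 todo = 'ES'
--         else:
--             d = trail.pop()     # no path from here: backtrack (IndexError at the root, like A)
--             if d == 'E':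
--                 node = (node[0], node[1] - 1)
--                 todo = 'S'
--             else:
--                 node = (node[0] - 1, node[1])
--                 todo = ''
--     return ''.join(trail)
-- ===== Notes on version B (the rewrite author's own statement) =====
-- stated objective: alternative
-- what changed: A's frontier-stack DFS (a stack of (path, node) frames fed by a neighbors helper building tuples via tuple(map(lambda)), visited marked at pop) is replaced by an in-place backtracking walker that keeps one current node, the trail of moves that led to it and the directions still untried there, marking cells visited when stepped onto; East-before-South preference and the returned path are identical.
import Mathlib
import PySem

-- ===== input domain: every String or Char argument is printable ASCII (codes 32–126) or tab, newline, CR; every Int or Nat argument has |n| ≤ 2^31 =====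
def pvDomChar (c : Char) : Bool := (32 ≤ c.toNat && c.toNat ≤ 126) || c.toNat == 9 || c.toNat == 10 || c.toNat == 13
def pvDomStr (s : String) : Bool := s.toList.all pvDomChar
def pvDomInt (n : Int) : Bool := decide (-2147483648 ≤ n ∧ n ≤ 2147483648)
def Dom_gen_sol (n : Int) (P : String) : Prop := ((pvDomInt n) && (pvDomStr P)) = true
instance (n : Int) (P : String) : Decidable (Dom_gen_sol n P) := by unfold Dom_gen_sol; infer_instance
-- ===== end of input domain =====

-- B replaces A's frontier-stack DFS (a stack of (path, node) frames fed by a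
-- neighbors helper) by an in-place backtracking walker that keeps one current
-- node, the trail of moves that led to it and the directions still untried
-- there, marking cells visited when stepped onto; same East-before-South
-- preference, same returned path.

-- ===== PORT A =====
-- helper neighbors(n, path, node, edges_restricted): paths are kept as List Char
-- (Python builds them with `path + 'S'`; String.ofList is applied once at the end).
def pvNeighbors (n : Int) (blocked : List ((Int × Int) × (Int × Int)))
    (path : List Char) (node : Int × Int) : List (List Char × (Int × Int)) :=
  let v1 : Int × Int := (node.1 + 1, node.2)   -- tuple(map(+), node, (1,0))
  let p1 := path ++ ['S']
  let v2 : Int × Int := (node.1, node.2 + 1)   -- tuple(map(+), node, (0,1))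
  let p2 := path ++ ['E']
  let ls : List (List Char × (Int × Int)) := []
  let ls := if (node, v1) ∉ blocked ∧ v1.1 < n ∧ v1.2 < n then ls ++ [(p1, v1)] else ls
  let ls := if (node, v2) ∉ blocked ∧ v2.1 < n ∧ v2.2 < n then ls ++ [(p2, v2)] else ls
  ls

-- helper gen_edges_restricted(P): the loop over P with state ini, building a set
def pvGenEdges : List Char → (Int × Int) → PySem.Set ((Int × Int) × (Int × Int)) →
    PySem.Set ((Int × Int) × (Int × Int))
  | [], _, st => st
  | m :: rest, ini, st =>
    let nxt : Int × Int := if m = 'S' then (ini.1 + 1, ini.2) else (ini.1, ini.2 + 1)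
    pvGenEdges rest nxt (PySem.Set.add st (ini, nxt))

-- the `while True` loop: Python's list is kept top-at-head (pop() = head,
-- extend ls = ls.reverse ++ stack).  Fuel only makes the loop a Lean function:
-- it is proved sufficient below; fuel 0 and the pop from an empty stack
-- (IndexError in Python, excluded by Pre_) return [].
def pvLoopA (n : Int) (blocked : List ((Int × Int) × (Int × Int))) :
    Nat → PySem.Set (Int × Int) → List (List Char × (Int × Int)) → List Char
  | 0, _, _ => []
  | _ + 1, _, [] => []
  | fuel + 1, visited, (path, node) :: rest =>
    if node = (n - 1, n - 1) then path
    else if node ∈ visited then pvLoopA n blocked fuel visited rest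
    else pvLoopA n blocked fuel (PySem.Set.add visited node)
      ((pvNeighbors n blocked path node).reverse ++ rest)

def gen_sol (n : Int) (P : String) : String :=
  String.ofList (pvLoopA n (pvGenEdges P.toList (0, 0) PySem.Set.empty)
    (2 * (n.toNat * n.toNat) + 2) PySem.Set.empty [([], (0, 0))])

-- ===== PORT B =====
-- the blocked-edge loop of Source B (state r, c and the set)
def pvBlocked : List Char → Int → Int → PySem.Set ((Int × Int) × (Int × Int)) →
    PySem.Set ((Int × Int) × (Int × Int))
  | [], _, _, st => st
  | ch :: rest, r, c, st =>
    if ch = 'S' then pvBlocked rest (r + 1) c (PySem.Set.add st ((r, c), (r + 1, c)))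
    else pvBlocked rest r (c + 1) (PySem.Set.add st ((r, c), (r, c + 1)))

-- the walker loop: trail is Python's list of moves, kept head = most recent
-- (append = cons, pop = head); todo is the string of directions still to try.
-- Fuel 0 and the pop of an empty trail (IndexError, excluded by Pre_) give [].
def pvLoopB (n : Int) (blocked : List ((Int × Int) × (Int × Int))) :
    Nat → PySem.Set (Int × Int) → List Char → (Int × Int) → List Char → List Char
  | 0, _, _, _, _ => []
  | fuel + 1, visited, trail, node, todo =>
    if node = (n - 1, n - 1) then trail
    else match todo with
      | d :: t' =>
        let nxt : Int × Int := if d = 'E' then (node.1, node.2 + 1) else (node.1 + 1, node.2)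
        if nxt.1 < n ∧ nxt.2 < n ∧ (node, nxt) ∉ blocked ∧ nxt ∉ visited then
          pvLoopB n blocked fuel (PySem.Set.add visited nxt) (d :: trail) nxt ['E', 'S']
        else pvLoopB n blocked fuel visited trail node t'
      | [] =>
        match trail with
        | [] => []
        | d :: tr' =>
          if d = 'E' then pvLoopB n blocked fuel visited tr' (node.1, node.2 - 1) ['S']
          else pvLoopB n blocked fuel visited tr' (node.1 - 1, node.2) []

def gen_sol_alt (n : Int) (P : String) : String :=
  String.ofList ((pvLoopB n (pvBlocked P.toList 0 0 PySem.Set.empty)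
    (4 * (n.toNat * n.toNat) + 4) (PySem.Set.add PySem.Set.empty (0, 0)) [] (0, 0)
    ['E', 'S']).reverse)

-- ===== PRECONDITION & SPEC =====
-- A raises IndexError (pop from an empty stack: the end cell is unreachable)
-- exactly when n ≤ 0; for every n ≥ 1 the search reaches (n-1, n-1) and A
-- returns, so Pre_ excludes no input on which A returns.
def Pre_gen_sol (n : Int) (P : String) : Prop := 1 ≤ n
instance (n : Int) (P : String) : Decidable (Pre_gen_sol n P) := by
  unfold Pre_gen_sol; infer_instance
def pvWitness_gen_sol : Int × String := (3, "EESS")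

def Spec_gen_sol (n : Int) (P : String) (out : String) : Prop := out = gen_sol_alt n P
instance (n : Int) (P : String) (out : String) : Decidable (Spec_gen_sol n P out) := by
  unfold Spec_gen_sol; infer_instance

-- ===== CLAIM (what is proved, stated in full; the proofs are below) =====
def Claim_equal_gen_sol : Prop :=
  ∀ (n : Int) (P : String), Dom_gen_sol n P → Pre_gen_sol n P → Spec_gen_sol n P (gen_sol n P)

-- ===== LEMMAS AND PROOFS =====

def pvChild (d : Char) (node : Int × Int) : Int × Int :=
  if d = 'E' then (node.1, node.2 + 1) else (node.1 + 1, node.2)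

def pvTry (n : Int) (blocked : List ((Int × Int) × (Int × Int))) :
    PySem.Set (Int × Int) → (Int × Int) → List Char →
    Option (List Char) × PySem.Set (Int × Int)
  | v, _, [] => (none, v)
  | v, node, d :: t' =>
    let nxt := pvChild d node
    if h : nxt.1 < n ∧ nxt.2 < n ∧ (node, nxt) ∉ blocked ∧ nxt ∉ v then
      if nxt = (n - 1, n - 1) then (some [d], PySem.Set.add v nxt)
      else
        match pvTry n blocked (PySem.Set.add v nxt) nxt ['E', 'S'] with
        | (some s, v') => (some (d :: s), v')
        | (none, v') => pvTry n blocked v' node t'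
    else pvTry n blocked v node t'
termination_by v node todo => ((2 * n - node.1 - node.2).toNat, todo.length)
decreasing_by
  · apply Prod.Lex.left
    have h1 : (pvChild d node).1 < n := h.1
    have h2 : (pvChild d node).2 < n := h.2.1
    by_cases hd : d = 'E' <;> simp [pvChild, hd] at h1 h2 ⊢ <;> omega
  · apply Prod.Lex.right'
    · omega
    · simp
  · apply Prod.Lex.right'
    · omega
    · simp

def pvStackRun (n : Int) (blocked : List ((Int × Int) × (Int × Int))) :
    PySem.Set (Int × Int) → List (List Char × (Int × Int)) → List Char
  | _, [] => []
  | v, (p, nd) :: rest =>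
    if nd = (n - 1, n - 1) then p
    else if nd ∈ v then pvStackRun n blocked v rest
    else
      match pvTry n blocked (PySem.Set.add v nd) nd ['E', 'S'] with
      | (some s, _) => p ++ s
      | (none, v') => pvStackRun n blocked v' rest

def pvBRun (n : Int) (blocked : List ((Int × Int) × (Int × Int))) :
    PySem.Set (Int × Int) → List Char → (Int × Int) → List Char → List Char
  | v, trail, node, todo =>
    if node = (n - 1, n - 1) then trail
    else
      match pvTry n blocked v node todo with
      | (some s, _) => s.reverse ++ trail
      | (none, v') =>
        match trail with
        | [] => []
        | d :: tr' =>
          if d = 'E' then pvBRun n blocked v' tr' (node.1, node.2 - 1) ['S']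
          else pvBRun n blocked v' tr' (node.1 - 1, node.2) []
termination_by v trail node todo => trail.length
decreasing_by all_goals simp

def pvPush (n : Int) (blocked : List ((Int × Int) × (Int × Int)))
    (p : List Char) (node : Int × Int) : List Char → List (List Char × (Int × Int))
  | [] => []
  | d :: t' =>
    (if ((node, pvChild d node) ∉ blocked ∧ (pvChild d node).1 < n ∧ (pvChild d node).2 < n) then [(p ++ [d], pvChild d node)] else [])
      ++ pvPush n blocked p node t'

def pvInGrid (n : Int) (x : Int × Int) : Prop :=
  0 ≤ x.1 ∧ x.1 < n ∧ 0 ≤ x.2 ∧ x.2 < n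

def pvWalk : List Char → (Int × Int) → PySem.Set (Int × Int) → Prop
  | [], node, _ => node = (0, 0)
  | d :: tr, node, v =>
    node ∈ v ∧ pvWalk tr (if d = 'E' then (node.1, node.2 - 1) else (node.1 - 1, node.2)) v

def pvTodoOK (todo : List Char) : Prop :=
  todo = ['E', 'S'] ∨ todo = ['S'] ∨ todo = []

theorem pv_len_le (n : Int) (v : PySem.Set (Int × Int)) (hnd : v.Nodup)
    (hg : ∀ x ∈ v, pvInGrid n x) : v.length ≤ n.toNat * n.toNat := by
  classical
  have hcard : v.toFinset.card = v.length := List.toFinset_card_of_nodup hnd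
  have hsub : v.toFinset ⊆ (Finset.range n.toNat ×ˢ Finset.range n.toNat).image
      (fun p : ℕ × ℕ => ((p.1 : Int), (p.2 : Int))) := by
    intro x hx
    obtain ⟨h1, h2, h3, h4⟩ := hg x (List.mem_toFinset.mp hx)
    simp only [Finset.mem_image, Finset.mem_product, Finset.mem_range]
    refine ⟨(x.1.toNat, x.2.toNat), ⟨by omega, by omega⟩, ?_⟩
    obtain ⟨a, b⟩ := x
    simp only [Prod.mk.injEq]
    constructor <;> simp at h1 h2 h3 h4 ⊢ <;> omega
  calc v.length = v.toFinset.card := hcard.symm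
    _ ≤ _ := Finset.card_le_card hsub
    _ ≤ (Finset.range n.toNat ×ˢ Finset.range n.toNat).card := Finset.card_image_le
    _ = n.toNat * n.toNat := by simp

theorem pvTry_none_fin (n : Int) (blocked : List ((Int × Int) × (Int × Int))) :
    ∀ (v : PySem.Set (Int × Int)) (node : Int × Int) (todo : List Char)
      (v' : PySem.Set (Int × Int)),
      (n - 1, n - 1) ∉ v → pvTry n blocked v node todo = (none, v') →
      (n - 1, n - 1) ∉ v' := by
  intro v node todo
  induction v, node, todo using pvTry.induct n blocked with
  | case1 v node =>
    intro v' hfin he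
    rw [pvTry] at he
    injection he with h1 h2
    exact h2 ▸ hfin
  | case2 v node d t' nxt h hfin' =>
    intro v' hfin he
    rw [pvTry] at he
    rw [dif_pos h, if_pos hfin'] at he
    cases he
  | case3 v node d t' nxt h hfin' s v1 heq =>
    intro v' hfin he
    rw [pvTry] at he
    rw [dif_pos h, if_neg hfin', heq] at he
    cases he
  | case4 v node d t' nxt h hfin' v1 heq ih1 ih2 =>
    intro v' hfin he
    rw [pvTry] at he
    rw [dif_pos h, if_neg hfin', heq] at he
    have hfin1 : (n - 1, n - 1) ∉ PySem.Set.add v nxt := by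
      intro hm
      rcases (PySem.Set.mem_add _ _ _).mp hm with hm | hm
      · exact hfin hm
      · exact hfin' hm.symm
    exact ih2 v' (ih1 v1 hfin1 heq) he
  | case5 v node d t' nxt h ih =>
    intro v' hfin he
    rw [pvTry] at he
    rw [dif_neg h] at he
    exact ih v' hfin he

theorem pvE1 (n : Int) (blocked : List ((Int × Int) × (Int × Int))) :
    ∀ (v : PySem.Set (Int × Int)) (node : Int × Int) (todo : List Char),
      (n - 1, n - 1) ∉ v → ∀ (p : List Char) (rest : List (List Char × (Int × Int))),
      pvStackRun n blocked v (pvPush n blocked p node todo ++ rest) =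
        (match pvTry n blocked v node todo with
         | (some s, _) => p ++ s
         | (none, v') => pvStackRun n blocked v' rest) := by
  intro v node todo
  induction v, node, todo using pvTry.induct n blocked with
  | case1 v node =>
    intro hfin p rest
    rw [pvTry]
    simp [pvPush]
  | case2 v node d t' nxt h hfin' =>
    intro hfin p rest
    have hnxt : nxt = pvChild d node := rfl
    have hv : ((node, nxt) ∉ blocked ∧ nxt.1 < n ∧ nxt.2 < n) := ⟨h.2.2.1, h.1, h.2.1⟩
    rw [pvTry, dif_pos h, if_pos hfin', pvPush, ← hnxt, if_pos hv]
    simp only [List.cons_append, List.nil_append]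
    simp only [pvStackRun]
    rw [if_pos hfin']
  | case3 v node d t' nxt h hfin' s v1 heq =>
    intro hfin p rest
    have hnxt : nxt = pvChild d node := rfl
    have hv : ((node, nxt) ∉ blocked ∧ nxt.1 < n ∧ nxt.2 < n) := ⟨h.2.2.1, h.1, h.2.1⟩
    rw [pvTry, dif_pos h, if_neg hfin', heq, pvPush, ← hnxt, if_pos hv]
    simp only [List.cons_append, List.nil_append]
    simp only [pvStackRun]
    rw [if_neg hfin', if_neg h.2.2.2, heq]
    simp
  | case4 v node d t' nxt h hfin' v1 heq ih1 ih2 =>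
    intro hfin p rest
    have hnxt : nxt = pvChild d node := rfl
    have hv : ((node, nxt) ∉ blocked ∧ nxt.1 < n ∧ nxt.2 < n) := ⟨h.2.2.1, h.1, h.2.1⟩
    have hfin1 : (n - 1, n - 1) ∉ PySem.Set.add v nxt := by
      intro hm
      rcases (PySem.Set.mem_add _ _ _).mp hm with hm | hm
      · exact hfin hm
      · exact hfin' hm.symm
    have hfinv1 : (n - 1, n - 1) ∉ v1 := pvTry_none_fin n blocked _ _ _ _ hfin1 heq
    rw [pvTry, dif_pos h, if_neg hfin', heq, pvPush, ← hnxt, if_pos hv]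
    simp only [List.cons_append, List.nil_append]
    simp only [pvStackRun]
    rw [if_neg hfin', if_neg h.2.2.2, heq]
    exact ih2 hfinv1 p rest
  | case5 v node d t' nxt h ih =>
    intro hfin p rest
    have hnxt : nxt = pvChild d node := rfl
    rw [pvTry, dif_neg h, pvPush, ← hnxt]
    by_cases hv : ((node, nxt) ∉ blocked ∧ nxt.1 < n ∧ nxt.2 < n)
    · have hmem : nxt ∈ v := by
        by_contra hnm
        exact h ⟨hv.2.1, hv.2.2, hv.1, hnm⟩
      have hne : ¬ nxt = (n - 1, n - 1) := by
        intro heq; exact hfin (heq ▸ hmem)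
      rw [if_pos hv]
      simp only [List.cons_append, List.nil_append]
      simp only [pvStackRun]
      rw [if_neg hne, if_pos hmem]
      exact ih hfin p rest
    · rw [if_neg hv, List.nil_append]
      exact ih hfin p rest

theorem pvNeighbors_reverse (n : Int) (blocked : List ((Int × Int) × (Int × Int)))
    (p : List Char) (node : Int × Int) :
    (pvNeighbors n blocked p node).reverse = pvPush n blocked p node ['E', 'S'] := by
  have hE : pvChild 'E' node = (node.1, node.2 + 1) := by simp [pvChild]
  have hS : pvChild 'S' node = (node.1 + 1, node.2) := by simp [pvChild]
  by_cases c1 : (node, ((node.1 + 1 : Int), node.2)) ∉ blocked ∧ node.1 + 1 < n ∧ node.2 < n <;>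
    by_cases c2 : (node, (node.1, (node.2 + 1 : Int))) ∉ blocked ∧ node.1 < n ∧ node.2 + 1 < n <;>
    simp [pvNeighbors, pvPush, hE, hS, c1, c2]

theorem pvPush_length (n : Int) (blocked : List ((Int × Int) × (Int × Int)))
    (p : List Char) (node : Int × Int) :
    (pvPush n blocked p node ['E', 'S']).length ≤ 2 := by
  by_cases c1 : ((node, pvChild 'E' node) ∉ blocked ∧ (pvChild 'E' node).1 < n ∧ (pvChild 'E' node).2 < n) <;>
    by_cases c2 : ((node, pvChild 'S' node) ∉ blocked ∧ (pvChild 'S' node).1 < n ∧ (pvChild 'S' node).2 < n) <;>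
    simp [pvPush, c1, c2]

theorem pvPush_grid (n : Int) (blocked : List ((Int × Int) × (Int × Int)))
    (p : List Char) (node : Int × Int) (hg : pvInGrid n node) :
    ∀ e ∈ pvPush n blocked p node ['E', 'S'], pvInGrid n e.2 := by
  obtain ⟨g1, g2, g3, g4⟩ := hg
  intro e he
  by_cases c1 : ((node, pvChild 'E' node) ∉ blocked ∧ (pvChild 'E' node).1 < n ∧ (pvChild 'E' node).2 < n) <;>
    by_cases c2 : ((node, pvChild 'S' node) ∉ blocked ∧ (pvChild 'S' node).1 < n ∧ (pvChild 'S' node).2 < n) <;>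
    simp [pvPush, c1, c2] at he <;>
    rcases he with he | he <;>
    (try subst he) <;>
    first
      | (obtain ⟨-, a1, a2⟩ := c1
         simp [pvChild] at a1 a2 ⊢
         exact ⟨by omega, a1, by omega, a2⟩)
      | (obtain ⟨-, a1, a2⟩ := c2
         simp [pvChild] at a1 a2 ⊢
         exact ⟨by omega, a1, by omega, a2⟩)

theorem pvLemA (n : Int) (blocked : List ((Int × Int) × (Int × Int))) :
    ∀ (fuel : Nat) (v : PySem.Set (Int × Int)) (stack : List (List Char × (Int × Int))),
      v.Nodup → (∀ x ∈ v, pvInGrid n x) → (n - 1, n - 1) ∉ v →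
      (∀ e ∈ stack, pvInGrid n e.2) →
      2 * (n.toNat * n.toNat) + stack.length ≤ fuel + 2 * v.length →
      pvLoopA n blocked fuel v stack = pvStackRun n blocked v stack := by
  intro fuel
  induction fuel with
  | zero =>
    intro v stack hnd hgv hfin hgs hfuel
    have hlen := pv_len_le n v hnd hgv
    have : stack = [] := by
      cases stack with
      | nil => rfl
      | cons a l => simp at hfuel; omega
    subst this
    rfl
  | succ fuel ih =>
    intro v stack hnd hgv hfin hgs hfuel
    cases stack with
    | nil => rfl
    | cons e rest =>
      obtain ⟨p, nd⟩ := e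
      simp only [pvLoopA]
      by_cases h1 : nd = (n - 1, n - 1)
      · simp only [pvStackRun]
        rw [if_pos h1, if_pos h1]
      · rw [if_neg h1]
        by_cases h2 : nd ∈ v
        · rw [if_pos h2]
          have := ih v rest hnd hgv hfin (fun e he => hgs e (List.mem_cons_of_mem _ he))
            (by simp at hfuel ⊢; omega)
          rw [this]
          simp only [pvStackRun]
          rw [if_neg h1, if_pos h2]
        · rw [if_neg h2]
          have hgnd : pvInGrid n nd := hgs (p, nd) List.mem_cons_self
          have hadd : PySem.Set.add v nd = v ++ [nd] := PySem.Set.add_of_not_mem h2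
          have hlen' : (PySem.Set.add v nd).length = v.length + 1 := by
            rw [hadd]; simp
          have hnd' : (PySem.Set.add v nd).Nodup := PySem.Set.nodup_add _ _ hnd
          have hgv' : ∀ x ∈ PySem.Set.add v nd, pvInGrid n x := by
            intro x hx
            rcases (PySem.Set.mem_add _ _ _).mp hx with hx | hx
            · exact hgv x hx
            · exact hx ▸ hgnd
          have hfin' : (n - 1, n - 1) ∉ PySem.Set.add v nd := by
            intro hm
            rcases (PySem.Set.mem_add _ _ _).mp hm with hm | hm
            · exact hfin hm
            · exact h1 hm.symm
          have hgs' : ∀ e ∈ (pvNeighbors n blocked p nd).reverse ++ rest, pvInGrid n e.2 := by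
            intro e he
            rcases List.mem_append.mp he with he | he
            · rw [pvNeighbors_reverse] at he
              exact pvPush_grid n blocked p nd hgnd e he
            · exact hgs e (List.mem_cons_of_mem _ he)
          have hplen : (pvNeighbors n blocked p nd).reverse.length ≤ 2 := by
            rw [pvNeighbors_reverse]
            exact pvPush_length n blocked p nd
          have hrec := ih (PySem.Set.add v nd) ((pvNeighbors n blocked p nd).reverse ++ rest)
            hnd' hgv' hfin' hgs'
            (by simp only [List.length_append, List.length_cons] at hfuel ⊢; omega)
          rw [hrec, pvNeighbors_reverse, pvE1 n blocked _ nd _ hfin' p rest]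
          simp only [pvStackRun]
          rw [if_neg h1, if_neg h2]

theorem pvWalk_mono (v w : PySem.Set (Int × Int)) (hsub : ∀ x ∈ v, x ∈ w) :
    ∀ (tr : List Char) (node : Int × Int), pvWalk tr node v → pvWalk tr node w := by
  intro tr
  induction tr with
  | nil => intro node h; exact h
  | cons d tr ih =>
    intro node h
    exact ⟨hsub _ h.1, ih _ h.2⟩

theorem pvBRun_skip (n : Int) (blocked : List ((Int × Int) × (Int × Int)))
    (v : PySem.Set (Int × Int)) (trail : List Char) (node : Int × Int)
    (d : Char) (t' : List Char) (hfin : ¬ node = (n - 1, n - 1))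
    (hc : ¬ ((pvChild d node).1 < n ∧ (pvChild d node).2 < n ∧
      (node, pvChild d node) ∉ blocked ∧ pvChild d node ∉ v)) :
    pvBRun n blocked v trail node (d :: t') = pvBRun n blocked v trail node t' := by
  conv_lhs => rw [pvBRun]
  conv_rhs => rw [pvBRun]
  rw [if_neg hfin, if_neg hfin, pvTry, dif_neg hc]

theorem pvE2 (n : Int) (blocked : List ((Int × Int) × (Int × Int)))
    (v : PySem.Set (Int × Int)) (trail : List Char) (node : Int × Int)
    (d : Char) (t' : List Char) (hfin : ¬ node = (n - 1, n - 1))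
    (hd : (d = 'E' ∧ t' = ['S']) ∨ (d = 'S' ∧ t' = []))
    (hc : (pvChild d node).1 < n ∧ (pvChild d node).2 < n ∧
      (node, pvChild d node) ∉ blocked ∧ pvChild d node ∉ v) :
    pvBRun n blocked (PySem.Set.add v (pvChild d node)) (d :: trail) (pvChild d node) ['E', 'S']
      = pvBRun n blocked v trail node (d :: t') := by
  conv_rhs => rw [pvBRun]
  rw [if_neg hfin, pvTry, dif_pos hc]
  by_cases hf : pvChild d node = (n - 1, n - 1)
  · rw [if_pos hf]
    conv_lhs => rw [pvBRun]
    rw [if_pos hf]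
    simp
  · rw [if_neg hf]
    conv_lhs => rw [pvBRun]
    rw [if_neg hf]
    rcases hres : pvTry n blocked (PySem.Set.add v (pvChild d node)) (pvChild d node) ['E', 'S']
      with ⟨os, v1⟩
    cases os with
    | some s => simp
    | none =>
      simp only []
      rcases hd with ⟨hd, ht⟩ | ⟨hd, ht⟩ <;> subst hd <;> subst ht
      · have hback : (((pvChild 'E' node).1 : Int), (pvChild 'E' node).2 - 1) = node := by
          simp [pvChild]
        rw [if_pos rfl, hback]
        conv_lhs => rw [pvBRun]
        rw [if_neg hfin]
      · have hback : (((pvChild 'S' node).1 - 1 : Int), (pvChild 'S' node).2) = node := by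
          simp [pvChild]
        have hSE : ¬ ('S' : Char) = 'E' := by decide
        rw [if_neg hSE, hback]
        conv_lhs => rw [pvBRun]
        rw [if_neg hfin]

theorem pvLemB (n : Int) (blocked : List ((Int × Int) × (Int × Int))) (hn : 1 ≤ n) :
    ∀ (fuel : Nat) (v : PySem.Set (Int × Int)) (trail : List Char) (node : Int × Int)
      (todo : List Char),
      v.Nodup → (∀ x ∈ v, pvInGrid n x) → pvTodoOK todo → pvWalk trail node v →
      4 * (n.toNat * n.toNat) + 2 * trail.length + todo.length ≤ fuel + 4 * v.length →
      pvLoopB n blocked fuel v trail node todo = pvBRun n blocked v trail node todo := by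
  intro fuel
  induction fuel with
  | zero =>
    intro v trail node todo hnd hgv htd hwalk hfuel
    have hlen := pv_len_le n v hnd hgv
    have htr : trail = [] := by
      cases trail with
      | nil => rfl
      | cons a l => simp at hfuel; omega
    have htd0 : todo = [] := by
      cases todo with
      | nil => rfl
      | cons a l => simp at hfuel; omega
    subst htr; subst htd0
    conv_rhs => rw [pvBRun]
    by_cases hf : node = (n - 1, n - 1)
    · rw [if_pos hf]; rfl
    · rw [if_neg hf, pvTry]; rfl
  | succ fuel ih =>
    intro v trail node todo hnd hgv htd hwalk hfuel
    by_cases hf : node = (n - 1, n - 1)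
    · simp only [pvLoopB]
      conv_rhs => rw [pvBRun]
      simp only [if_pos hf]
    · cases todo with
      | nil =>
        cases trail with
        | nil =>
          simp only [pvLoopB]
          conv_rhs => rw [pvBRun]
          simp only [if_neg hf]
          rw [pvTry]
        | cons d tr' =>
          obtain ⟨hmem, hwalk'⟩ := hwalk
          simp only [pvLoopB]
          rw [if_neg hf]
          show (if d = 'E' then pvLoopB n blocked fuel v tr' (node.1, node.2 - 1) ['S']
              else pvLoopB n blocked fuel v tr' (node.1 - 1, node.2) []) = _
          conv_rhs => rw [pvBRun]
          rw [if_neg hf, pvTry]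
          show _ = (if d = 'E' then pvBRun n blocked v tr' (node.1, node.2 - 1) ['S']
              else pvBRun n blocked v tr' (node.1 - 1, node.2) [])
          by_cases hd : d = 'E'
          · simp only [if_pos hd]
            rw [if_pos hd] at hwalk'
            exact ih v tr' (node.1, node.2 - 1) ['S'] hnd hgv (Or.inr (Or.inl rfl)) hwalk'
              (by simp at hfuel ⊢; omega)
          · simp only [if_neg hd]
            rw [if_neg hd] at hwalk'
            exact ih v tr' (node.1 - 1, node.2) [] hnd hgv (Or.inr (Or.inr rfl)) hwalk'
              (by simp at hfuel ⊢; omega)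
      | cons d t' =>
        have hdt : (d = 'E' ∧ t' = ['S']) ∨ (d = 'S' ∧ t' = []) := by
          rcases htd with h | h | h
          · injection h with h1 h2; exact Or.inl ⟨h1, h2⟩
          · injection h with h1 h2; exact Or.inr ⟨h1, h2⟩
          · cases h
        have hgnode : pvInGrid n node := by
          cases trail with
          | nil =>
            rw [hwalk]
            exact ⟨le_refl 0, by omega, le_refl 0, by omega⟩
          | cons m tr => exact hgv node hwalk.1
        simp only [pvLoopB]
        rw [if_neg hf]
        show (if (pvChild d node).1 < n ∧ (pvChild d node).2 < n ∧
              (node, pvChild d node) ∉ blocked ∧ pvChild d node ∉ v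
            then pvLoopB n blocked fuel (PySem.Set.add v (pvChild d node)) (d :: trail)
              (pvChild d node) ['E', 'S']
            else pvLoopB n blocked fuel v trail node t') = _
        by_cases hc : (pvChild d node).1 < n ∧ (pvChild d node).2 < n ∧
            (node, pvChild d node) ∉ blocked ∧ pvChild d node ∉ v
        · rw [if_pos hc]
          have hgc : pvInGrid n (pvChild d node) := by
            obtain ⟨g1, g2, g3, g4⟩ := hgnode
            refine ⟨?_, hc.1, ?_, hc.2.1⟩ <;>
              by_cases hdE : d = 'E' <;> simp [pvChild, hdE] <;> omega
          have hsub : ∀ x ∈ v, x ∈ PySem.Set.add v (pvChild d node) := by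
            intro x hx; exact (PySem.Set.mem_add _ _ _).mpr (Or.inl hx)
          have hback : (if d = 'E' then (((pvChild d node).1 : Int), (pvChild d node).2 - 1)
              else ((pvChild d node).1 - 1, (pvChild d node).2)) = node := by
            by_cases hdE : d = 'E' <;> simp [pvChild, hdE]
          have hwalk' : pvWalk (d :: trail) (pvChild d node) (PySem.Set.add v (pvChild d node)) := by
            refine ⟨(PySem.Set.mem_add _ _ _).mpr (Or.inr rfl), ?_⟩
            rw [hback]
            exact pvWalk_mono v _ hsub trail node hwalk
          have hlen' : (PySem.Set.add v (pvChild d node)).length = v.length + 1 := by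
            rw [PySem.Set.add_of_not_mem hc.2.2.2]; simp
          have hrec := ih (PySem.Set.add v (pvChild d node)) (d :: trail) (pvChild d node)
            ['E', 'S'] (PySem.Set.nodup_add _ _ hnd)
            (by
              intro x hx
              rcases (PySem.Set.mem_add _ _ _).mp hx with hx | hx
              · exact hgv x hx
              · exact hx ▸ hgc)
            (Or.inl rfl) hwalk'
            (by simp only [List.length_cons, hlen'] at hfuel ⊢; simp at hfuel ⊢; omega)
          rw [hrec]
          exact pvE2 n blocked v trail node d t' hf hdt hc
        · rw [if_neg hc]
          have htd' : pvTodoOK t' := by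
            rcases hdt with ⟨-, ht⟩ | ⟨-, ht⟩
            · exact Or.inr (Or.inl ht)
            · exact Or.inr (Or.inr ht)
          rw [ih v trail node t' hnd hgv htd' hwalk (by simp at hfuel ⊢; omega)]
          exact (pvBRun_skip n blocked v trail node d t' hf hc).symm

theorem pvEdges_eq : ∀ (l : List Char) (r c : Int)
    (st : PySem.Set ((Int × Int) × (Int × Int))),
    pvGenEdges l (r, c) st = pvBlocked l r c st := by
  intro l
  induction l with
  | nil => intro r c st; rfl
  | cons ch rest ih =>
    intro r c st
    by_cases h : ch = 'S' <;> simp only [pvGenEdges, pvBlocked, h, if_pos,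
      reduceIte] <;> exact ih _ _ _

theorem pvMain (n : Int) (blocked : List ((Int × Int) × (Int × Int))) :
    pvStackRun n blocked PySem.Set.empty [([], (0, 0))] =
      (pvBRun n blocked (PySem.Set.add PySem.Set.empty (0, 0)) [] (0, 0) ['E', 'S']).reverse := by
  simp only [pvStackRun]
  conv_rhs => rw [pvBRun]
  by_cases hf : ((0 : Int), (0 : Int)) = (n - 1, n - 1)
  · simp only [if_pos hf]
    rfl
  · simp only [if_neg hf]
    have hemp : ¬ ((0 : Int), (0 : Int)) ∈ (PySem.Set.empty : PySem.Set (Int × Int)) := by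
      intro h; cases h
    rw [if_neg hemp]
    rcases hres : pvTry n blocked (PySem.Set.add PySem.Set.empty (0, 0)) (0, 0) ['E', 'S']
      with ⟨os, v'⟩
    cases os with
    | some s => simp
    | none => simp

-- ===== VERDICT (by name: the statement is the Claim_ definition above) =====
theorem gen_sol_spec : Claim_equal_gen_sol := by
  intro n P hdom hpre
  unfold Pre_gen_sol at hpre
  unfold Spec_gen_sol
  unfold gen_sol gen_sol_alt
  rw [pvEdges_eq P.toList 0 0 PySem.Set.empty]
  have hg00 : pvInGrid n (0, 0) := ⟨le_refl 0, by omega, le_refl 0, by omega⟩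
  have hA := pvLemA n (pvBlocked P.toList 0 0 PySem.Set.empty)
    (2 * (n.toNat * n.toNat) + 2) PySem.Set.empty [([], (0, 0))]
    List.nodup_nil (by intro x hx; cases hx) (by intro h; cases h)
    (by intro e he; rcases List.mem_singleton.mp he with rfl; exact hg00)
    (by simp)
  have hinit : PySem.Set.add (PySem.Set.empty : PySem.Set (Int × Int)) (0, 0) = [(0, 0)] := rfl
  have hB := pvLemB n (pvBlocked P.toList 0 0 PySem.Set.empty) hpre
    (4 * (n.toNat * n.toNat) + 4) (PySem.Set.add PySem.Set.empty (0, 0)) [] (0, 0) ['E', 'S']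
    (by rw [hinit]; exact List.nodup_singleton _)
    (by rw [hinit]; intro x hx; rcases List.mem_singleton.mp hx with rfl; exact hg00)
    (Or.inl rfl) rfl
    (by rw [hinit]; simp)
  rw [hA, hB, pvMain]
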